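-- pv_equiv track=rewrite | github.com/VladimirIvanovski/Pragmatika | document_manager.py | _extract_entry_title
-- ===== SOURCE A (Python) =====
-- def _extract_entry_title(content: dict, fallback: str) -> str:
--     """Pick the best title from doc content: first Heading paragraph, or first non-empty paragraph."""
--     for p in content.get('paragraphs') or []:
--         style = p.get('style') or ''
--         text = p.get('text', '').strip()
--         if text and ('Heading' in style or 'Title' in style):
--             return text[:200]
--     for p in content.get('paragraphs') or []:
--         text = p.get('text', '').strip()
--         if text:
--             return text[:200]
--     return fallback
-- ===== SOURCE B (Python) =====
-- def _extract_entry_title(content: dict, fallback: str) -> str: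
--     """Single pass: return first Heading/Title paragraph text immediately,
--     otherwise remember the first non-empty paragraph text."""
--     first_nonempty = None
--     for p in content.get('paragraphs') or []:
--         text = p.get('text', '').strip()
--         style = p.get('style') or ''
--         if text and ('Heading' in style or 'Title' in style):
--             return text[:200]
--         if text and first_nonempty is None:
--             first_nonempty = text
--     return first_nonempty[:200] if first_nonempty is not None else fallback
-- ===== Notes on version B (the rewrite author's own statement) =====
-- stated objective: simpler
-- what changed: Replaced A's two sequential scans of the paragraph list (one for headings, one for first non-empty text) with a single pass that returns a heading immediately while tracking the first non-empty text in an accumulator.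
import Mathlib
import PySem

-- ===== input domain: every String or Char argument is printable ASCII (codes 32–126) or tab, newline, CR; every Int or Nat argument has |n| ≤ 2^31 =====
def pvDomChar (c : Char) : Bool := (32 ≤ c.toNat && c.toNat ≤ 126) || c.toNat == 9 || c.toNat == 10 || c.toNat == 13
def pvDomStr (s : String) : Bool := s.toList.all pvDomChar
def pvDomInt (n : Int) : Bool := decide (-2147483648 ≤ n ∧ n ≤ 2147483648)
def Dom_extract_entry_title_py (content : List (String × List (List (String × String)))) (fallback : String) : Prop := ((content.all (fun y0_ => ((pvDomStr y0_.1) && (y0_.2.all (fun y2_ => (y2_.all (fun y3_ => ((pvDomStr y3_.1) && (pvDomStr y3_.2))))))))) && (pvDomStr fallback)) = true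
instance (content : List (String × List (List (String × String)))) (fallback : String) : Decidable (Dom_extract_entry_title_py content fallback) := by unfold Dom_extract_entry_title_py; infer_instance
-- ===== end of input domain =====

-- ===== PORT A =====
-- B is the same extraction as a single pass over the paragraphs (one loop with a
-- first-nonempty accumulator) instead of A's two sequential scans; equal return values proved.

-- dict.get on an association-list paragraph: first match, with default
def pvGetField (p : List (String × String)) (k : String) (dflt : String) : String :=
  (p.lookup k).getD dflt

-- A's first loop: return first stripped text of a Heading/Title-styled paragraph, [:200]
def pvA_headLoop : List (List (String × String)) → Option String
  | [] => none
  | p :: rest =>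
    let style := pvGetField p "style" ""        -- p.get('style') or ''
    let text := PySem.Str.strip (pvGetField p "text" "")
    if text ≠ "" ∧ (PySem.Str.isIn "Heading" style ∨ PySem.Str.isIn "Title" style) then
      some (PySem.Str.slice text none (some 200))
    else pvA_headLoop rest

-- A's second loop: first non-empty stripped text, [:200]
def pvA_textLoop : List (List (String × String)) → Option String
  | [] => none
  | p :: rest =>
    let text := PySem.Str.strip (pvGetField p "text" "")
    if text ≠ "" then some (PySem.Str.slice text none (some 200))
    else pvA_textLoop rest

def extract_entry_title_py (content : List (String × List (List (String × String)))) (fallback : String) : String :=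
  let paras := (content.lookup "paragraphs").getD []   -- content.get('paragraphs') or []
  match pvA_headLoop paras with
  | some t => t
  | none =>
    match pvA_textLoop paras with
    | some t => t
    | none => fallback

-- ===== PORT B =====
-- single loop carrying the first-nonempty accumulator
def pvB_loop : List (List (String × String)) → Option String → String → String
  | [], firstNonempty, fallback =>
    match firstNonempty with
    | some t => PySem.Str.slice t none (some 200)
    | none => fallback
  | p :: rest, firstNonempty, fallback =>
    let text := PySem.Str.strip (pvGetField p "text" "")
    let style := pvGetField p "style" ""
    if text ≠ "" ∧ (PySem.Str.isIn "Heading" style ∨ PySem.Str.isIn "Title" style) then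
      PySem.Str.slice text none (some 200)
    else if text ≠ "" ∧ firstNonempty = none then
      pvB_loop rest (some text) fallback
    else
      pvB_loop rest firstNonempty fallback

def extract_entry_title_py_alt (content : List (String × List (List (String × String)))) (fallback : String) : String :=
  pvB_loop ((content.lookup "paragraphs").getD []) none fallback

-- ===== PRECONDITION & SPEC =====
def Spec_extract_entry_title_py (content : List (String × List (List (String × String)))) (fallback : String) (out : String) : Prop := out = extract_entry_title_py_alt content fallback
instance (content : List (String × List (List (String × String)))) (fallback : String) (out : String) : Decidable (Spec_extract_entry_title_py content fallback out) := by unfold Spec_extract_entry_title_py; infer_instance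

-- ===== CLAIM (what is proved, stated in full; the proofs are below) =====
def Claim_equal_extract_entry_title_py : Prop := ∀ (content : List (String × List (List (String × String)))) (fallback : String), Dom_extract_entry_title_py content fallback → Spec_extract_entry_title_py content fallback (extract_entry_title_py content fallback)

-- ===== LEMMAS AND PROOFS =====

-- One loop with an accumulator equals the two scans: if the heading scan hits, that wins;
-- otherwise an already-recorded first non-empty text wins; otherwise the text scan decides.
theorem pvB_loop_eq (ps : List (List (String × String))) :
    ∀ (first? : Option String) (fb : String),
    pvB_loop ps first? fb =
      match pvA_headLoop ps with
      | some t => t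
      | none =>
        match first? with
        | some t0 => PySem.Str.slice t0 none (some 200)
        | none =>
          match pvA_textLoop ps with
          | some t => t
          | none => fb := by
  induction ps with
  | nil => intro first? fb; cases first? <;> simp [pvB_loop, pvA_headLoop, pvA_textLoop]
  | cons p rest ih =>
    intro first? fb
    simp only [pvB_loop, pvA_headLoop, pvA_textLoop]
    by_cases hH : PySem.Str.strip (pvGetField p "text" "") ≠ "" ∧
        (PySem.Str.isIn "Heading" (pvGetField p "style" "") = true ∨
          PySem.Str.isIn "Title" (pvGetField p "style" "") = true)
    · rw [if_pos hH, if_pos hH]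
    · rw [if_neg hH, if_neg hH]
      by_cases hT : PySem.Str.strip (pvGetField p "text" "") ≠ ""
      · rw [if_pos hT]
        cases first? with
        | none => rw [if_pos ⟨hT, rfl⟩, ih]
        | some t0 => rw [if_neg (by rintro ⟨_, h⟩; simp at h), ih]
      · rw [if_neg hT, if_neg (by rintro ⟨h, _⟩; exact hT h), ih]

-- ===== VERDICT (by name: the statement is the Claim_ definition above) =====
theorem extract_entry_title_py_spec : Claim_equal_extract_entry_title_py := by
  intro content fallback _
  unfold Spec_extract_entry_title_py extract_entry_title_py extract_entry_title_py_alt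
  rw [pvB_loop_eq]
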